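-- pv_equiv track=rewrite | github.com/Bryan-Brenes/PracticaExamen3 | Ejercicios.py | sumaJugador_aux
-- ===== SOURCE A (Python) =====
-- def sumaJugador_aux(lista, indiceGlobal, indice, Jugador, resultado):
--     if indiceGlobal == len(lista):
--         return resultado
--     else:
--         if indice == len(lista[0]):
--             indiceGlobal += 1
--             indice = 0
--         if indiceGlobal != len(lista):
--             if lista[indiceGlobal][indice][0] == Jugador:
--                 resultado += lista[indiceGlobal][indice][1]
--         return sumaJugador_aux(lista, indiceGlobal, indice + 1, Jugador, resultado)
-- ===== SOURCE B (Python) =====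
-- def sumaJugador_aux(lista, indiceGlobal, indice, Jugador, resultado):
--     if indiceGlobal == len(lista):
--         return resultado
--     if indice == len(lista[0]):
--         indiceGlobal += 1
--         indice = 0
--     total = resultado
--     for r in range(indiceGlobal, len(lista)):
--         for c in range(indice if r == indiceGlobal else 0, len(lista[0])):
--             nombre, valor = lista[r][c]
--             if nombre == Jugador:
--                 total += valor
--     return total
-- ===== Notes on version B (the rewrite author's own statement) =====
-- stated objective: idiomatic
-- what changed: A's one-cell-per-call recursion (which redoes the row/column bookkeeping at every call and recurses once per cell) is replaced by a plain iterative double for-loop over the remaining rows and columns accumulating the sum, avoiding recursion depth proportional to the grid size.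
-- outside the precondition, e.g. on sumaJugador_aux([[], []], 1, 0, 'a', 5): A returns 5, B returns 5; on sumaJugador_aux([[('a', 1)], [('b', 2), ('a', 4)]], 1, -2, 'b', 0): A returns 4, B returns 4
import Mathlib
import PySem

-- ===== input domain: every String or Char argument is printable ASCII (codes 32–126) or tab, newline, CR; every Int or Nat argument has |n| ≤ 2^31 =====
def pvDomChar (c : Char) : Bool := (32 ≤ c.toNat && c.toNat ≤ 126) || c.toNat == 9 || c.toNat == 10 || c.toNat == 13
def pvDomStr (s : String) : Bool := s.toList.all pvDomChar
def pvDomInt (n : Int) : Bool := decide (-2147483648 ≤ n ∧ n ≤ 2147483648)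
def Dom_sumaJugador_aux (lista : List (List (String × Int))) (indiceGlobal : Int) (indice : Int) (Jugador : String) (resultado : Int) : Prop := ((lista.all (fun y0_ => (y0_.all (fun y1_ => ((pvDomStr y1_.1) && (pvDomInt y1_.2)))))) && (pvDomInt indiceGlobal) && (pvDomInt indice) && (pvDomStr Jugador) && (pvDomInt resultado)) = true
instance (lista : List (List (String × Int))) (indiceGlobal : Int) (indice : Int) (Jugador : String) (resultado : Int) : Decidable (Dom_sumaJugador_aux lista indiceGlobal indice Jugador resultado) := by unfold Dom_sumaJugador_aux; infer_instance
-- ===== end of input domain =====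

-- B replaces A's one-cell-per-call recursion by a plain iterative double for-loop over the
-- remaining rows and columns (objective: idiomatic; same asymptotic cost, no recursion depth).

-- ===== PORT A =====
-- A's recursion is ported with an input-derived fuel bound; on the admitted inputs the fuel is
-- never exhausted (proved below), so the port computes exactly A's recursion.
def sumaJugador_aux_go (fuel : Nat) (lista : List (List (String × Int))) (indiceGlobal : Int) (indice : Int) (Jugador : String) (resultado : Int) : Int :=
  match fuel with
  | 0 => resultado
  | fuel + 1 =>
    if indiceGlobal = PySem.List.len lista then resultado
    else
      let p := if indice = PySem.List.len (lista.headD []) then (indiceGlobal + 1, (0 : Int)) else (indiceGlobal, indice)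
      let resultado :=
        if p.1 ≠ PySem.List.len lista then
          let cell := PySem.List.pyGetD (PySem.List.pyGetD lista p.1 []) p.2 ("", 0)
          if cell.1 = Jugador then resultado + cell.2 else resultado
        else resultado
      sumaJugador_aux_go fuel lista p.1 (p.2 + 1) Jugador resultado

def sumaJugador_aux (lista : List (List (String × Int))) (indiceGlobal : Int) (indice : Int) (Jugador : String) (resultado : Int) : Int :=
  sumaJugador_aux_go (2 * (lista.length + 2) * ((lista.headD []).length + 2) + (lista.map List.length).sum + 2) lista indiceGlobal indice Jugador resultado

-- ===== PORT B =====
def sumaJugador_aux_alt (lista : List (List (String × Int))) (indiceGlobal : Int) (indice : Int) (Jugador : String) (resultado : Int) : Int :=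
  if indiceGlobal = PySem.List.len lista then resultado
  else
    let p := if indice = PySem.List.len (lista.headD []) then (indiceGlobal + 1, (0 : Int)) else (indiceGlobal, indice)
    (PySem.List.pyRange p.1 (PySem.List.len lista) 1).foldl (fun total r =>
      (PySem.List.pyRange (if r = p.1 then p.2 else 0) (PySem.List.len (lista.headD [])) 1).foldl (fun total c =>
        let cell := PySem.List.pyGetD (PySem.List.pyGetD lista r []) c ("", 0)
        if cell.1 = Jugador then total + cell.2 else total) total) resultado

-- ===== PRECONDITION & SPEC =====
-- Pre_ admits (1) indiceGlobal = len(lista), where A returns at once, and (2) grids whose rows are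
-- at least as long as row 0, with start indices in [-len, len] (Python's in-range negative indices
-- included).  It excludes exactly the inputs on which A raises IndexError (jagged shorter rows,
-- indices past the end) plus a few degenerate returning corners — zero-width rows entered on the
-- last row, and start columns below -len(lista[0]) reaching into an oversized first row — where
-- A's value arises only from its equality-reset / wraparound accidents (B agrees with A there too,
-- but neither behaviour is specified).
def Pre_sumaJugador_aux (lista : List (List (String × Int))) (indiceGlobal : Int) (indice : Int) (Jugador : String) (resultado : Int) : Prop :=
  indiceGlobal = (lista.length : Int) ∨
  ((∀ row ∈ lista, (lista.headD []).length ≤ row.length) ∧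
   -(lista.length : Int) ≤ indiceGlobal ∧ indiceGlobal < (lista.length : Int) ∧
   0 < (lista.headD []).length ∧
   -((lista.headD []).length : Int) ≤ indice ∧ indice ≤ ((lista.headD []).length : Int))
instance (lista : List (List (String × Int))) (indiceGlobal : Int) (indice : Int) (Jugador : String) (resultado : Int) : Decidable (Pre_sumaJugador_aux lista indiceGlobal indice Jugador resultado) := by unfold Pre_sumaJugador_aux; infer_instance

def pvWitness_sumaJugador_aux : (List (List (String × Int))) × Int × Int × String × Int :=
  ([[("ana", 3), ("bob", 2)], [("bob", 5), ("ana", 1)]], 0, 1, "bob", 10)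

def Spec_sumaJugador_aux (lista : List (List (String × Int))) (indiceGlobal : Int) (indice : Int) (Jugador : String) (resultado : Int) (out : Int) : Prop := out = sumaJugador_aux_alt lista indiceGlobal indice Jugador resultado
instance (lista : List (List (String × Int))) (indiceGlobal : Int) (indice : Int) (Jugador : String) (resultado : Int) (out : Int) : Decidable (Spec_sumaJugador_aux lista indiceGlobal indice Jugador resultado out) := by unfold Spec_sumaJugador_aux; infer_instance

-- ===== CLAIM (what is proved, stated in full; the proofs are below) =====
def Claim_equal_sumaJugador_aux : Prop := ∀ (lista : List (List (String × Int))) (indiceGlobal : Int) (indice : Int) (Jugador : String) (resultado : Int), Dom_sumaJugador_aux lista indiceGlobal indice Jugador resultado → Pre_sumaJugador_aux lista indiceGlobal indice Jugador resultado → Spec_sumaJugador_aux lista indiceGlobal indice Jugador resultado (sumaJugador_aux lista indiceGlobal indice Jugador resultado)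

-- ===== LEMMAS AND PROOFS =====

theorem pvWitness_ok : Dom_sumaJugador_aux pvWitness_sumaJugador_aux.1 pvWitness_sumaJugador_aux.2.1 pvWitness_sumaJugador_aux.2.2.1 pvWitness_sumaJugador_aux.2.2.2.1 pvWitness_sumaJugador_aux.2.2.2.2 ∧ Pre_sumaJugador_aux pvWitness_sumaJugador_aux.1 pvWitness_sumaJugador_aux.2.1 pvWitness_sumaJugador_aux.2.2.1 pvWitness_sumaJugador_aux.2.2.2.1 pvWitness_sumaJugador_aux.2.2.2.2 := by
  constructor <;> decide

-- Contribution of the cell at (Python) row index r, column index c.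
def pvCellVal (J : String) (lista : List (List (String × Int))) (r c : Int) : Int :=
  if (PySem.List.pyGetD (PySem.List.pyGetD lista r []) c ("", 0)).1 = J then
    (PySem.List.pyGetD (PySem.List.pyGetD lista r []) c ("", 0)).2
  else 0

-- Contribution of row r, columns s .. len(lista[0]) - 1.
def pvRowValFrom (J : String) (lista : List (List (String × Int))) (r s : Int) : Int :=
  ((PySem.List.pyRange s (((lista.headD []).length : Int)) 1).map (pvCellVal J lista r)).sum

-- Contribution of rows j .. len(lista) - 1, each over columns 0 .. len(lista[0]) - 1.
def pvGridFrom (J : String) (lista : List (List (String × Int))) (j : Int) : Int :=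
  ((PySem.List.pyRange j ((lista.length : Int)) 1).map (fun r => pvRowValFrom J lista r 0)).sum

-- What both programs add to resultado from state (j, s), after A's reset normalization.
def pvU (J : String) (lista : List (List (String × Int))) (j s : Int) : Int :=
  if j = (lista.length : Int) then 0
  else if s = ((lista.headD []).length : Int) then pvGridFrom J lista (j + 1)
  else pvRowValFrom J lista j s + pvGridFrom J lista (j + 1)

theorem pvRow_end (J : String) (lista : List (List (String × Int))) (r : Int) :
    pvRowValFrom J lista r (((lista.headD []).length : Int)) = 0 := by
  rw [pvRowValFrom, PySem.List.pyRange_one_eq_nil (le_refl _)]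
  rfl

theorem pvRow_step (J : String) (lista : List (List (String × Int))) (r s : Int)
    (hs : s < ((lista.headD []).length : Int)) :
    pvRowValFrom J lista r s = pvCellVal J lista r s + pvRowValFrom J lista r (s + 1) := by
  rw [pvRowValFrom, PySem.List.pyRange_one_cons hs, List.map_cons, List.sum_cons, pvRowValFrom]

theorem pvGrid_end (J : String) (lista : List (List (String × Int))) :
    pvGridFrom J lista ((lista.length : Int)) = 0 := by
  rw [pvGridFrom, PySem.List.pyRange_one_eq_nil (le_refl _)]
  rfl

theorem pvGrid_step (J : String) (lista : List (List (String × Int))) (j : Int)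
    (hj : j < (lista.length : Int)) :
    pvGridFrom J lista j = pvRowValFrom J lista j 0 + pvGridFrom J lista (j + 1) := by
  rw [pvGridFrom, PySem.List.pyRange_one_cons hj, List.map_cons, List.sum_cons, pvGridFrom]

-- The accumulation step of either program is adding pvCellVal.
theorem pvAcc (J : String) (lista : List (List (String × Int))) (r c : Int) (res : Int) :
    (if (PySem.List.pyGetD (PySem.List.pyGetD lista r []) c ("", 0)).1 = J then
        res + (PySem.List.pyGetD (PySem.List.pyGetD lista r []) c ("", 0)).2
      else res) = res + pvCellVal J lista r c := by
  rw [pvCellVal]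
  split <;> ring

-- A's recursion computes resultado + pvU, given enough fuel.
theorem A_go_eq (J : String) (lista : List (List (String × Int))) :
    ∀ (fuel : Nat) (j s res : Int), 0 < fuel →
      (j = (lista.length : Int) ∨
        (j < (lista.length : Int) ∧ 0 < (lista.headD []).length ∧
         s ≤ ((lista.headD []).length : Int) ∧
         (((lista.length : Int) - j) * (((lista.headD []).length : Int) + 1) +
           (((lista.headD []).length : Int) + 1 - s)).toNat < fuel)) →
      sumaJugador_aux_go fuel lista j s J res = res + pvU J lista j s := by
  intro fuel
  induction fuel with
  | zero => intro j s res hf _; omega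
  | succ fuel ih =>
    intro j s res _ hcase
    rw [sumaJugador_aux_go]
    simp only [PySem.List.len_eq]
    rcases hcase with hjn | ⟨hjl, hL, hsL, hm⟩
    · rw [if_pos hjn, pvU, if_pos hjn]
      ring
    · rw [if_neg (by omega)]
      by_cases hs : s = ((lista.headD []).length : Int)
      · rw [if_pos hs]
        simp only []
        have hsp : ((lista.length : Int) - j) * (((lista.headD []).length : Int) + 1)
            = ((lista.length : Int) - (j + 1)) * (((lista.headD []).length : Int) + 1)
              + (((lista.headD []).length : Int) + 1) := by ring
        rw [hsp, hs] at hm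
        have hA0 : (0 : Int) ≤ ((lista.length : Int) - (j + 1)) * (((lista.headD []).length : Int) + 1) :=
          mul_nonneg (by omega) (by omega)
        by_cases hj1 : j + 1 = (lista.length : Int)
        · rw [if_neg (by omega)]
          rw [ih (j + 1) (0 + 1) res (by
              generalize ((lista.length : Int) - (j + 1)) * (((lista.headD []).length : Int) + 1) = A at hA0 hm
              omega) (Or.inl hj1)]
          rw [pvU, if_pos hj1, pvU, if_neg (by omega), if_pos hs, hj1, pvGrid_end]
        · rw [if_pos (by omega)]
          rw [pvAcc]
          rw [ih (j + 1) (0 + 1) _ (by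
              generalize ((lista.length : Int) - (j + 1)) * (((lista.headD []).length : Int) + 1) = A at hA0 hm
              omega) (Or.inr ⟨by omega, hL, by omega, by
              generalize ((lista.length : Int) - (j + 1)) * (((lista.headD []).length : Int) + 1) = A at hA0 hm ⊢
              omega⟩)]
          have hUR : pvU J lista j s
              = pvCellVal J lista (j + 1) 0 + pvU J lista (j + 1) (0 + 1) := by
            rw [pvU, if_neg (by omega), if_pos hs, pvGrid_step J lista (j + 1) (by omega),
              pvRow_step J lista (j + 1) 0 (by omega), pvU, if_neg (by omega)]
            by_cases h1L : (0 : Int) + 1 = ((lista.headD []).length : Int)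
            · rw [if_pos h1L]
              have hre := pvRow_end J lista (j + 1)
              rw [← h1L] at hre
              rw [hre]
              ring
            · rw [if_neg h1L]
              ring
          rw [hUR]
          ring
      · rw [if_neg hs]
        simp only []
        rw [if_pos (show j ≠ (lista.length : Int) by omega)]
        rw [pvAcc]
        have hA0 : (0 : Int) ≤ ((lista.length : Int) - j) * (((lista.headD []).length : Int) + 1) :=
          mul_nonneg (by omega) (by omega)
        rw [ih j (s + 1) _ (by
            generalize ((lista.length : Int) - j) * (((lista.headD []).length : Int) + 1) = A at hA0 hm
            omega) (Or.inr ⟨hjl, hL, by omega, by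
            generalize ((lista.length : Int) - j) * (((lista.headD []).length : Int) + 1) = A at hA0 hm ⊢
            omega⟩)]
        have hUR : pvU J lista j s = pvCellVal J lista j s + pvU J lista j (s + 1) := by
          rw [pvU, if_neg (by omega), if_neg hs, pvRow_step J lista j s (by omega),
            pvU, if_neg (by omega)]
          by_cases hs1 : s + 1 = ((lista.headD []).length : Int)
          · rw [if_pos hs1]
            have hre := pvRow_end J lista j
            rw [← hs1] at hre
            rw [hre]
            ring
          · rw [if_neg hs1]
            ring
        rw [hUR]
        ring

-- B's double for-loop, as a sum over the iterated ranges.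
theorem pvB_sum (J : String) (lista : List (List (String × Int))) (p1 p2 res : Int) :
    List.foldl (fun total r =>
        List.foldl (fun total c =>
            if (PySem.List.pyGetD (PySem.List.pyGetD lista r []) c ("", 0)).1 = J then
              total + (PySem.List.pyGetD (PySem.List.pyGetD lista r []) c ("", 0)).2
            else total) total
          (PySem.List.pyRange (if r = p1 then p2 else 0) (((lista.headD []).length : Int)) 1)) res
      (PySem.List.pyRange p1 ((lista.length : Int)) 1)
      = res + (if p1 = (lista.length : Int) ∨ (lista.length : Int) < p1 then 0
          else pvRowValFrom J lista p1 p2 + pvGridFrom J lista (p1 + 1)) := by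
  have hb : (fun (total : Int) (r : Int) =>
      List.foldl (fun total c =>
          if (PySem.List.pyGetD (PySem.List.pyGetD lista r []) c ("", 0)).1 = J then
            total + (PySem.List.pyGetD (PySem.List.pyGetD lista r []) c ("", 0)).2
          else total) total
        (PySem.List.pyRange (if r = p1 then p2 else 0) (((lista.headD []).length : Int)) 1))
      = fun total r => total + pvRowValFrom J lista r (if r = p1 then p2 else 0) := by
    funext total r
    rw [show (fun (total : Int) (c : Int) =>
        if (PySem.List.pyGetD (PySem.List.pyGetD lista r []) c ("", 0)).1 = J then
          total + (PySem.List.pyGetD (PySem.List.pyGetD lista r []) c ("", 0)).2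
        else total) = fun total c => total + pvCellVal J lista r c from by
      funext t c
      exact pvAcc J lista r c t]
    rw [PySem.List.foldl_add, pvRowValFrom]
  rw [hb, PySem.List.foldl_add]
  by_cases hp1 : p1 = (lista.length : Int) ∨ (lista.length : Int) < p1
  · rw [if_pos hp1, PySem.List.pyRange_one_eq_nil (by omega)]
    rfl
  · rw [if_neg hp1, PySem.List.pyRange_one_cons (by omega), List.map_cons, List.sum_cons, if_pos rfl]
    have hcong : (PySem.List.pyRange (p1 + 1) ((lista.length : Int)) 1).map
          (fun r => pvRowValFrom J lista r (if r = p1 then p2 else 0))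
        = (PySem.List.pyRange (p1 + 1) ((lista.length : Int)) 1).map
          (fun r => pvRowValFrom J lista r 0) := by
      apply List.map_congr_left
      intro r hr
      rw [if_neg (by have := (PySem.List.mem_pyRange_one).mp hr; omega)]
    rw [hcong, pvGridFrom]

-- B computes resultado + pvU.
theorem B_eq (J : String) (lista : List (List (String × Int))) (j s res : Int)
    (hj : j ≤ (lista.length : Int)) :
    sumaJugador_aux_alt lista j s J res = res + pvU J lista j s := by
  unfold sumaJugador_aux_alt
  simp only [PySem.List.len_eq]
  by_cases hjn : j = (lista.length : Int)
  · rw [if_pos hjn, pvU, if_pos hjn]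
    ring
  · rw [if_neg hjn]
    by_cases hsL : s = ((lista.headD []).length : Int)
    · rw [if_pos hsL]
      simp only []
      rw [pvB_sum J lista (j + 1) 0 res, pvU, if_neg hjn, if_pos hsL]
      by_cases hj1 : j + 1 = (lista.length : Int)
      · rw [if_pos (Or.inl hj1), hj1, pvGrid_end]
      · rw [if_neg (by omega), pvGrid_step J lista (j + 1) (by omega)]
    · rw [if_neg hsL]
      simp only []
      rw [pvB_sum J lista j s res, pvU, if_neg hjn, if_neg hsL, if_neg (by omega)]

-- ===== VERDICT (by name: the statement is the Claim_ definition above) =====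
theorem sumaJugador_aux_spec : Claim_equal_sumaJugador_aux := by
  intro lista iG i J res _ hpre
  unfold Spec_sumaJugador_aux
  have hj : iG ≤ (lista.length : Int) := by
    rcases hpre with h | ⟨_, _, h, _⟩ <;> omega
  rw [B_eq J lista iG i res hj]
  unfold sumaJugador_aux
  apply A_go_eq J lista _ iG i res (by omega)
  rcases hpre with hjn | ⟨_, hlo, hjl, hL, hslo, hshi⟩
  · exact Or.inl hjn
  · refine Or.inr ⟨hjl, hL, hshi, ?_⟩
    set n := lista.length with hn
    set L := (lista.headD []).length with hLd
    have h1 : ((n : Int) - iG) * ((L : Int) + 1) ≤ (2 * (n : Int)) * ((L : Int) + 1) :=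
      mul_le_mul_of_nonneg_right (by omega) (by positivity)
    have h2 : ((2 * (n : Int)) * ((L : Int) + 1) + 2 * (L : Int) + 1)
        = ((2 * n * (L + 1) + 2 * L + 1 : Nat) : Int) := by push_cast; ring
    have h3 : 2 * (n + 2) * (L + 2) = 2 * n * (L + 1) + 2 * n + 4 * L + 8 := by ring
    have h4 : (((n : Int) - iG) * ((L : Int) + 1) + ((L : Int) + 1 - i)).toNat
        ≤ 2 * n * (L + 1) + 2 * L + 1 := by
      have h5 : (((n : Int) - iG) * ((L : Int) + 1) + ((L : Int) + 1 - i))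
          ≤ ((2 * n * (L + 1) + 2 * L + 1 : Nat) : Int) := by
        rw [← h2]
        generalize hA : ((n : Int) - iG) * ((L : Int) + 1) = A at h1
        generalize hB : (2 * (n : Int)) * ((L : Int) + 1) = B at h1
        omega
      omega
    generalize hC : 2 * n * (L + 1) = C at h3 h4
    omega
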